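-- pv_equiv track=rewrite | github.com/sermoz/dyrel.py | src/dyrel/signature.py | signature_code
-- ===== SOURCE A (Python) =====
-- from collections.abc import Iterable
--
-- def signature_code(keys: Iterable[tuple[str, bool]]) -> str:
--     """Compute the signature code by the signature keys"""
--
--     def parts():
--         pending_dot = False
--
--         for key, is_bearing in keys:
--             if pending_dot:
--                 yield "."
--                 pending_dot = False
--
--             yield key
--
--             if is_bearing:
--                 yield ":"
--             else:
--                 pending_dot = True
--
--     return "".join(parts())
-- ===== SOURCE B (Python) =====
-- def signature_code(keys):
--     """Compute the signature code by the signature keys"""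
--     s = "".join(key + (":" if is_bearing else ".") for key, is_bearing in keys)
--     return s[:-1] if s.endswith(".") else s
-- ===== Notes on version B (the rewrite author's own statement) =====
-- stated objective: simpler
-- what changed: B builds one token per key (key plus ':' or '.') and joins them, then drops a single trailing '.', replacing A's stateful generator with a pending-dot lookahead flag by a map-join plus post-processing.
import Mathlib
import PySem

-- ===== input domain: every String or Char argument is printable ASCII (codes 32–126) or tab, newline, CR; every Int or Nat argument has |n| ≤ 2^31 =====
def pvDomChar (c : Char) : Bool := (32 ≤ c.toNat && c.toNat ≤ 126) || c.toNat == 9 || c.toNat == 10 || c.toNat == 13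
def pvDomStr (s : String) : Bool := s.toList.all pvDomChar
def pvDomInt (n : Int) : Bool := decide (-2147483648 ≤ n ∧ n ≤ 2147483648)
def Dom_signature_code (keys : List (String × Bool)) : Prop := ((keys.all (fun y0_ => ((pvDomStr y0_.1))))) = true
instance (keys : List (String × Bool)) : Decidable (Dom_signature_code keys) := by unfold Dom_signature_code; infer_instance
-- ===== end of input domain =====

-- B replaces A's stateful generator (pending-dot lookahead flag) by joining one token per key
-- (key ++ ':' or '.') and then dropping a single trailing '.'; objective: simpler decomposition.

-- ===== PORT A =====
-- A's generator loop body: state = (pieces emitted so far, pending_dot)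
def sigStep (st : List String × Bool) (kb : String × Bool) : List String × Bool :=
  let st := if st.2 then (st.1 ++ ["."], false) else st
  let st := (st.1 ++ [kb.1], st.2)
  if kb.2 then (st.1 ++ [":"], st.2) else (st.1, true)

def signature_code (keys : List (String × Bool)) : String :=
  PySem.Str.join "" (keys.foldl sigStep ([], false)).1

-- ===== PORT B =====
def signature_code_alt (keys : List (String × Bool)) : String :=
  let s := PySem.Str.join "" (keys.map (fun kb => kb.1 ++ (if kb.2 then ":" else ".")))
  if PySem.Str.endswith s "." then PySem.Str.slice s none (some (-1)) else s

-- ===== PRECONDITION & SPEC =====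
def Spec_signature_code (keys : List (String × Bool)) (out : String) : Prop := out = signature_code_alt keys
instance (keys : List (String × Bool)) (out : String) : Decidable (Spec_signature_code keys out) := by unfold Spec_signature_code; infer_instance

-- ===== CLAIM (what is proved, stated in full; the proofs are below) =====
def Claim_equal_signature_code : Prop := ∀ (keys : List (String × Bool)), Dom_signature_code keys → Spec_signature_code keys (signature_code keys)

-- ===== LEMMAS AND PROOFS =====

-- the characters A's generator emits from pending-dot state p over the remaining keys
def sigR : Bool → List (String × Bool) → List Char
  | _, [] => []
  | p, kb :: r => (if p then ['.'] else []) ++ kb.1.toList ++ (if kb.2 then [':'] else []) ++ sigR (!kb.2) r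

theorem sigR_cons (p : Bool) (kb : String × Bool) (r : List (String × Bool)) :
    sigR p (kb :: r) = (if p then ['.'] else []) ++ kb.1.toList ++ (if kb.2 then [':'] else []) ++ sigR (!kb.2) r := rfl

-- the pending_dot flag after the loop, started from p
def sigPend : Bool → List (String × Bool) → Bool
  | p, [] => p
  | _, kb :: r => sigPend (!kb.2) r

theorem join_empty_toList (xs : List String) :
    (PySem.Str.join "" xs).toList = (xs.map String.toList).flatten := by
  simp only [PySem.Str.toList_join, String.toList_empty, PySem.Chars.join, List.intercalate]
  induction xs with
  | nil => rfl
  | cons h t ih => cases t <;> simp_all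

theorem foldA_eq (keys : List (String × Bool)) : ∀ (acc : List String) (p : Bool),
    ((keys.foldl sigStep (acc, p)).1.map String.toList).flatten
      = (acc.map String.toList).flatten ++ sigR p keys := by
  induction keys with
  | nil => intro acc p; simp [sigR]
  | cons kb r ih =>
    intro acc p
    cases hb : kb.2 <;> cases p <;>
      simp [List.foldl_cons, sigStep, hb, ih, sigR, List.append_assoc]

theorem tok_eq (keys : List (String × Bool)) : ∀ (p : Bool),
    (if p then ['.'] else []) ++
      (keys.map (fun kb => kb.1.toList ++ (if kb.2 then [':'] else ['.']))).flatten
    = sigR p keys ++ (if sigPend p keys then ['.'] else []) := by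
  induction keys with
  | nil => intro p; simp [sigR, sigPend]
  | cons kb r ih =>
    intro p
    cases hb : kb.2 <;> cases p <;>
      simp [sigR, sigPend, hb, ← ih, List.append_assoc]

theorem sigR_last (keys : List (String × Bool)) : ∀ (p : Bool), sigPend p keys = false →
    sigR p keys = [] ∨ ∃ t, sigR p keys = t ++ [':'] := by
  induction keys with
  | nil => intro p hp; left; rfl
  | cons kb r ih =>
    intro p hp
    simp only [sigPend] at hp
    cases hb : kb.2
    · rw [hb] at hp
      cases r with
      | nil => simp [sigPend] at hp
      | cons x r' =>
        rcases ih true hp with h | ⟨t, ht⟩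
        · exact absurd h (by simp [sigR])
        · right
          refine ⟨(if p then ['.'] else []) ++ kb.1.toList ++ t, ?_⟩
          rw [sigR_cons, hb]
          rw [show (!false) = true from rfl, ht]
          simp [List.append_assoc]
    · rw [hb] at hp
      rcases ih false hp with h | ⟨t, ht⟩
      · right
        refine ⟨(if p then ['.'] else []) ++ kb.1.toList, ?_⟩
        simp [sigR, hb, h]
      · right
        refine ⟨(if p then ['.'] else []) ++ kb.1.toList ++ [':'] ++ t, ?_⟩
        rw [sigR_cons, hb, show (!true) = false from rfl, ht]
        simp [List.append_assoc]

theorem endswith_colon (t : List Char) : PySem.Chars.endswith (t ++ [':']) ['.'] = false := by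
  cases h : PySem.Chars.endswith (t ++ [':']) ['.'] with
  | false => rfl
  | true =>
    obtain ⟨u, hu⟩ := (PySem.Chars.endswith_iff _ _).mp h
    have := congrArg List.getLast? hu
    simp at this

theorem toList_alt (keys : List (String × Bool)) :
    (signature_code_alt keys).toList = sigR false keys := by
  unfold signature_code_alt
  have hs : (PySem.Str.join "" (keys.map (fun kb => kb.1 ++ (if kb.2 then ":" else ".")))).toList
      = sigR false keys ++ (if sigPend false keys then ['.'] else []) := by
    rw [join_empty_toList, List.map_map]
    have hmap : keys.map (String.toList ∘ (fun kb => kb.1 ++ (if kb.2 then ":" else ".")))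
        = keys.map (fun kb => kb.1.toList ++ (if kb.2 then [':'] else ['.'])) := by
      apply List.map_congr_left
      intro kb _
      cases hb : kb.2 <;> simp [hb]
    rw [hmap]
    have := tok_eq keys false
    simpa using this
  cases hpend : sigPend false keys
  · simp only [hpend, Bool.false_eq_true, if_false, List.append_nil] at hs
    rw [if_neg]
    · exact hs
    · simp only [PySem.Str.endswith_eq, show (".").toList = ['.'] from rfl, hs]
      rcases sigR_last keys false hpend with h | ⟨t, ht⟩
      · rw [h]
        decide
      · rw [ht]
        simp [endswith_colon]
  · simp only [hpend, if_true] at hs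
    rw [if_pos]
    · rw [PySem.Str.slice_to_neg_one, hs]
      simp
    · simp only [PySem.Str.endswith_eq, show (".").toList = ['.'] from rfl, hs]
      exact (PySem.Chars.endswith_iff _ _).mpr (List.suffix_append _ _)

-- ===== VERDICT (by name: the statement is the Claim_ definition above) =====
theorem signature_code_spec : Claim_equal_signature_code := by
  intro keys _
  unfold Spec_signature_code
  apply String.toList_inj.mp
  rw [toList_alt]
  show (signature_code keys).toList = _
  unfold signature_code
  rw [join_empty_toList, foldA_eq keys [] false]
  rfl
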